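-- pv_equiv track=rewrite | github.com/arverma/100DaysOfCode | Day_62/MAXSPPROD.py | _first_greater
-- ===== SOURCE A (Python) =====
-- def _first_greater(A, prev=True):
--     stack = list()
--     ans = [0] * len(A)
--
--     if(prev):
--         it = range(len(A))
--     else:
--         it = range(len(A)-1, -1, -1)
--
--     for i in it:
--         while stack and A[i] >= A[stack[-1]]:
--             stack.pop()
--         ans[i] = stack[-1] if stack else 0
--         stack.append(i)
--     return ans
-- ===== SOURCE B (Python) =====
-- def _first_greater(A, prev=True):
--     # Direct nearest-greater scan per element (no stack): for each i, walk
--     # toward the boundary and report the first strictly greater element's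
--     # index, 0 if there is none (matching A's 0 sentinel).
--     n = len(A)
--     if prev:
--         return [next((j for j in range(i - 1, -1, -1) if A[j] > A[i]), 0)
--                 for i in range(n)]
--     return [next((j for j in range(i + 1, n) if A[j] > A[i]), 0)
--             for i in range(n)]
-- ===== Notes on version B (the rewrite author's own statement) =====
-- stated objective: simpler
-- what changed: Replaced the monotonic-stack pass with a direct per-element scan: for each i, walk left (or right for prev=False) and return the first strictly greater element's index, 0 if none.
import Mathlib
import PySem

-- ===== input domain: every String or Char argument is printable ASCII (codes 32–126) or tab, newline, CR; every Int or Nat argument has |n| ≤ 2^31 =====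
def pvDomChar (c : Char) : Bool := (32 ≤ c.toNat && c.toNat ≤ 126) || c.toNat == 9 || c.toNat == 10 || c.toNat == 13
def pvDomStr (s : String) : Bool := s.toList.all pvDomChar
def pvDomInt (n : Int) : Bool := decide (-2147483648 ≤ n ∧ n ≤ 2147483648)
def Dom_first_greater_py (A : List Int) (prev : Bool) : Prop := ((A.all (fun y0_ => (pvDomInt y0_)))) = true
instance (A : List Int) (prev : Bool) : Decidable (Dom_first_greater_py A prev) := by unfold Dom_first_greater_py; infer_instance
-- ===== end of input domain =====

-- B replaces A's monotonic stack with a per-element direct scan for the nearest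
-- strictly greater neighbour (objective: simpler; not faster).

-- ===== PORT A =====
-- stack is modelled head-as-top (append = cons, pop = tail, stack[-1] = head);
-- all indices fed to A.getD are provably in range, so getD is exact here.
def fgWhile (A : List Int) (ai : Int) : List Nat → List Nat
  | [] => []
  | t :: rest => if A.getD t 0 ≤ ai then fgWhile A ai rest else t :: rest

def fgStep (A : List Int) (st : List Nat × List Int) (i : Nat) : List Nat × List Int :=
  let s := fgWhile A (A.getD i 0) st.1
  let ansi : Int := match s with | [] => 0 | t :: _ => (t : Int)
  (i :: s, st.2.set i ansi)

def first_greater_py (A : List Int) (prev : Bool) : List Int :=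
  ((if prev then List.range A.length else (List.range A.length).reverse).foldl
    (fgStep A) ([], List.replicate A.length 0)).2

-- ===== PORT B =====
-- scan j, j-1, …, 0 for the first index holding a value > v; at index 0 the
-- Python yields 0 whether or not A[0] > v (the found index IS 0), so the base
-- case returns 0 directly.
def searchDown (A : List Int) (v : Int) : Nat → Int
  | 0 => 0
  | j+1 => if A.getD (j+1) 0 > v then ((j : Int) + 1) else searchDown A v j

-- scan j, j+1, …, length-1 for the first index holding a value > v, else 0.
def searchUp (A : List Int) (v : Int) (j : Nat) : Int :=
  if h : j < A.length then (if A.getD j 0 > v then (j : Int) else searchUp A v (j+1)) else 0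
termination_by A.length - j

def first_greater_py_alt (A : List Int) (prev : Bool) : List Int :=
  if prev then
    (List.range A.length).map (fun i =>
      match i with | 0 => (0 : Int) | j+1 => searchDown A (A.getD (j+1) 0) j)
  else
    (List.range A.length).map (fun i => searchUp A (A.getD i 0) (i+1))

-- ===== PRECONDITION & SPEC =====
def Spec_first_greater_py (A : List Int) (prev : Bool) (out : List Int) : Prop := out = first_greater_py_alt A prev
instance (A : List Int) (prev : Bool) (out : List Int) : Decidable (Spec_first_greater_py A prev out) := by unfold Spec_first_greater_py; infer_instance

-- ===== CLAIM (what is proved, stated in full; the proofs are below) =====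
def Claim_equal_first_greater_py : Prop := ∀ (A : List Int) (prev : Bool), Dom_first_greater_py A prev → Spec_first_greater_py A prev (first_greater_py A prev)

-- ===== LEMMAS AND PROOFS =====

-- answer read off a stack: top index, 0 if empty
def stackAns : List Nat → Int
  | [] => 0
  | t :: _ => (t : Int)

-- the value B's prev-pass assigns at index j (same match as the alt port)
def fval (A : List Int) (j : Nat) : Int :=
  match j with | 0 => 0 | j+1 => searchDown A (A.getD (j+1) 0) j

-- the value B's next-pass assigns at index j
def rval (A : List Int) (j : Nat) : Int := searchUp A (A.getD j 0) (j+1)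

-- "scan down from k-1 with query v": what the stack must answer at stage k
def sdown (A : List Int) (v : Int) : Nat → Int
  | 0 => 0
  | j+1 => searchDown A v j

lemma fval_eq_sdown (A : List Int) (j : Nat) : fval A j = sdown A (A.getD j 0) j := by
  cases j <;> rfl

lemma pop_pop (A : List Int) (u v : Int) (h : u ≤ v) :
    ∀ S : List Nat, fgWhile A v (fgWhile A u S) = fgWhile A v S := by
  intro S
  induction S with
  | nil => rfl
  | cons t S' ih =>
      by_cases ht : A.getD t 0 ≤ u
      · simp only [fgWhile, if_pos ht, if_pos (le_trans ht h), ih]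
      · simp only [fgWhile, if_neg ht]

lemma getElem?_set_map (a : List Int) (i j : Nat) (v : Int) :
    (a.set i v)[j]? = if i = j then a[j]?.map (fun _ => v) else a[j]? := by
  rw [List.getElem?_set]
  by_cases hij : i = j
  · subst hij
    by_cases hi : i < a.length
    · rw [if_pos rfl, if_pos rfl, if_pos hi, List.getElem?_eq_getElem hi]; rfl
    · rw [if_pos rfl, if_pos rfl, if_neg hi, List.getElem?_eq_none (by omega)]; rfl
  · rw [if_neg hij, if_neg hij]

lemma fgStep_eq (A : List Int) (S : List Nat) (a : List Int) (i : Nat) :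
    fgStep A (S, a) i =
      (i :: fgWhile A (A.getD i 0) S, a.set i (stackAns (fgWhile A (A.getD i 0) S))) := by
  unfold fgStep
  cases fgWhile A (A.getD i 0) S <;> rfl

-- stack invariant survives a push at index k (forward pass)
lemma push_inv_fwd (A : List Int) (k : Nat) (S : List Nat)
    (hS : ∀ v, stackAns (fgWhile A v S) = sdown A v k) :
    ∀ v, stackAns (fgWhile A v (k :: fgWhile A (A.getD k 0) S)) = sdown A v (k+1) := by
  intro v
  by_cases hk : A.getD k 0 ≤ v
  · rw [show fgWhile A v (k :: fgWhile A (A.getD k 0) S)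
          = fgWhile A v (fgWhile A (A.getD k 0) S) by simp only [fgWhile, if_pos hk],
        pop_pop A _ _ hk, hS]
    cases k with
    | zero => rfl
    | succ j =>
        simp only [sdown, searchDown]
        rw [if_neg (show ¬ A.getD (j+1) 0 > v by omega)]
  · rw [show fgWhile A v (k :: fgWhile A (A.getD k 0) S) = k :: fgWhile A (A.getD k 0) S by
          simp only [fgWhile, if_neg hk]]
    cases k with
    | zero => simp [stackAns, sdown, searchDown]
    | succ j =>
        simp only [stackAns, sdown, searchDown]
        rw [if_pos (show A.getD (j+1) 0 > v by omega)]
        push_cast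
        ring

-- stack invariant survives a push at index k (backward pass), k in range
lemma push_inv_bwd (A : List Int) (k : Nat) (hk : k < A.length) (S : List Nat)
    (hS : ∀ v, stackAns (fgWhile A v S) = searchUp A v (k+1)) :
    ∀ v, stackAns (fgWhile A v (k :: fgWhile A (A.getD k 0) S)) = searchUp A v k := by
  intro v
  rw [searchUp, dif_pos hk]
  by_cases hv : A.getD k 0 ≤ v
  · rw [show fgWhile A v (k :: fgWhile A (A.getD k 0) S)
          = fgWhile A v (fgWhile A (A.getD k 0) S) by simp only [fgWhile, if_pos hv],
        pop_pop A _ _ hv, hS, if_neg (show ¬ A.getD k 0 > v by omega)]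
  · rw [show fgWhile A v (k :: fgWhile A (A.getD k 0) S) = k :: fgWhile A (A.getD k 0) S by
          simp only [fgWhile, if_neg hv],
        if_pos (show A.getD k 0 > v by omega)]
    rfl

-- forward pass: folding indices k, k+1, …, k+c-1 writes fval at those slots
lemma fwd (A : List Int) :
    ∀ (c k : Nat) (S : List Nat) (a : List Int),
      (∀ v, stackAns (fgWhile A v S) = sdown A v k) →
      ∀ j, (((List.range' k c).foldl (fgStep A) (S, a)).2)[j]? =
        if k ≤ j ∧ j < k + c then a[j]?.map (fun _ => fval A j) else a[j]? := by
  intro c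
  induction c with
  | zero =>
      intro k S a _ j
      simp
  | succ c ih =>
      intro k S a hS j
      rw [List.range'_succ, List.foldl_cons, fgStep_eq, hS,
          ih (k+1) _ _ (push_inv_fwd A k S hS) j]
      rw [← fval_eq_sdown]
      by_cases h1 : k + 1 ≤ j ∧ j < k + 1 + c
      · rw [if_pos h1, if_pos (show k ≤ j ∧ j < k + (c+1) by omega), getElem?_set_map,
          if_neg (show k ≠ j by omega)]
      · rw [if_neg h1, getElem?_set_map]
        by_cases h2 : k = j
        · subst h2; simp [show k ≤ k ∧ k < k + (c+1) by omega]
        · simp [h2, show ¬ (k ≤ j ∧ j < k + (c+1)) by omega]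

-- backward pass: folding indices k-1, …, 0 writes rval at those slots
lemma bwd (A : List Int) :
    ∀ (k : Nat), k ≤ A.length → ∀ (S : List Nat) (a : List Int),
      (∀ v, stackAns (fgWhile A v S) = searchUp A v k) →
      ∀ j, ((((List.range k).reverse).foldl (fgStep A) (S, a)).2)[j]? =
        if j < k then a[j]?.map (fun _ => rval A j) else a[j]? := by
  intro k
  induction k with
  | zero =>
      intro _ S a _ j
      simp
  | succ k ih =>
      intro hk S a hS j
      rw [show (List.range (k+1)).reverse = k :: (List.range k).reverse by
            rw [List.range_succ]; simp,
          List.foldl_cons, fgStep_eq, hS,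
          ih (by omega) _ _ (push_inv_bwd A k (by omega) S hS) j]
      have hrv : searchUp A (A.getD k 0) (k+1) = rval A k := rfl
      rw [hrv, getElem?_set_map]
      by_cases h1 : j < k
      · simp [h1, show j < k + 1 by omega, show k ≠ j by omega]
      · by_cases h2 : k = j
        · subst h2; simp [show k < k + 1 by omega]
        · simp [h1, h2, show ¬ j < k + 1 by omega]

theorem first_greater_py_spec : Claim_equal_first_greater_py := by
  intro A prev _
  unfold Spec_first_greater_py first_greater_py first_greater_py_alt
  cases prev
  · -- prev = false: backward pass
    rw [if_neg Bool.false_ne_true, if_neg Bool.false_ne_true]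
    apply List.ext_getElem?
    intro j
    rw [List.getElem?_map]
    by_cases hj : j < A.length
    · rw [List.getElem?_range hj,
          bwd A A.length le_rfl [] (List.replicate A.length 0)
            (by intro v; simp [fgWhile, stackAns, searchUp]) j,
          if_pos hj, List.getElem?_replicate, if_pos hj]
      rfl
    · rw [List.getElem?_eq_none (l := List.range A.length) (by rw [List.length_range]; omega),
          bwd A A.length le_rfl [] (List.replicate A.length 0)
            (by intro v; simp [fgWhile, stackAns, searchUp]) j,
          if_neg hj, List.getElem?_replicate, if_neg hj]
      rfl
  · -- prev = true: forward pass
    rw [if_pos rfl, if_pos rfl]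
    apply List.ext_getElem?
    intro j
    rw [List.getElem?_map]
    by_cases hj : j < A.length
    · rw [List.getElem?_range hj, List.range_eq_range',
          fwd A A.length 0 [] (List.replicate A.length 0) (fun v => rfl) j,
          if_pos (show 0 ≤ j ∧ j < 0 + A.length by omega),
          List.getElem?_replicate, if_pos hj]
      cases j <;> rfl
    · rw [List.getElem?_eq_none (l := List.range A.length) (by rw [List.length_range]; omega),
          List.range_eq_range',
          fwd A A.length 0 [] (List.replicate A.length 0) (fun v => rfl) j,
          if_neg (show ¬ (0 ≤ j ∧ j < 0 + A.length) by omega),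
          List.getElem?_replicate, if_neg hj]
      rfl
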